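-- pv_equiv track=rewrite | github.com/mduda-prog/Simplificador-e-Normalizador-de-Gram-ticas-Livres-de-Contexto. | code.py | remove_unreachable
-- ===== SOURCE A (Python) =====
-- def remove_unreachable(grammar, start="S"):
--     reachable = set()
--     stack = [start]
--     while stack:
--         symbol = stack.pop()
--         if symbol not in reachable:
--             reachable.add(symbol)
--             for prod in grammar.get(symbol, []):
--                 for s in prod:
--                     if s.isupper():
--                         stack.append(s)
--     return {k: v for k, v in grammar.items() if k in reachable}
-- ===== SOURCE B (Python) =====
-- def remove_unreachable(grammar, start="S"):
--     reachable = set()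
--
--     def visit(symbol):
--         if symbol in reachable:
--             return
--         reachable.add(symbol)
--         for prod in grammar.get(symbol, []):
--             for s in prod:
--                 if s.isupper():
--                     visit(s)
--
--     visit(start)
--     return {k: v for k, v in grammar.items() if k in reachable}
-- ===== Notes on version B (the rewrite author's own statement) =====
-- stated objective: alternative
-- what changed: The explicit-stack worklist DFS is replaced by a recursive depth-first search (an inner visit() helper that recurses on each uppercase symbol of each production), traversing the grammar in a different order but computing the same reachable set.
import Mathlib
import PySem

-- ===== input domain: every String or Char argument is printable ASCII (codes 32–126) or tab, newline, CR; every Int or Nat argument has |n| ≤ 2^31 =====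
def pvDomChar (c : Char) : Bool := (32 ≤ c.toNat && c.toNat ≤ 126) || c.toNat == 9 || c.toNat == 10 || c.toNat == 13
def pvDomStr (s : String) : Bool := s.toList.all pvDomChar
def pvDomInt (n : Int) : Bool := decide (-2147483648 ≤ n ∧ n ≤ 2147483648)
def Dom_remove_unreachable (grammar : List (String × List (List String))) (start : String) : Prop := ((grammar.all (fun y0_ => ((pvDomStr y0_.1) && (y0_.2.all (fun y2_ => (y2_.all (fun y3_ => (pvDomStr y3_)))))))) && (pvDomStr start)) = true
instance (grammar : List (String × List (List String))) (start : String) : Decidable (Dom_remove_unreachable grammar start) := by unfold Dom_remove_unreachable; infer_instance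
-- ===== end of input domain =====

-- B rewrites A's explicit-stack worklist DFS as a recursive depth-first search (inner visit()
-- helper); same reachable set, same returned dict — a different decomposition, not faster.

-- ===== PORT A =====

-- hand port of Python str.isupper(): at least one cased character and no lowercase one;
-- exact on the ASCII domain (Dom_), where the cased characters are exactly a-z and A-Z.
def pyIsupper (s : String) : Bool :=
  s.toList.any (fun c => PySem.Chars.isupper c || PySem.Chars.islower c) &&
  s.toList.all (fun c => !PySem.Chars.islower c)

-- the uppercase symbols occurring in the productions of `sym` (what both Pythons push/visit,
-- in order): `for prod in grammar.get(sym, []): for s in prod: if s.isupper(): …`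
def symsOf (grammar : List (String × List (List String))) (sym : String) : List String :=
  (PySem.Dict.getD ⟨grammar⟩ sym []).flatMap (fun prod => prod.filter pyIsupper)

-- the universe of symbols a traversal can ever see: the start symbol and every symbol of
-- every production (used only for the termination measure of the two traversals)
def UU (grammar : List (String × List (List String))) (start : String) : List String :=
  start :: grammar.flatMap (fun kv => kv.2.flatMap (fun prod => prod))

theorem symsOf_mem_UU (grammar : List (String × List (List String))) (start sym : String)
    {b : String} (hb : b ∈ symsOf grammar sym) : b ∈ UU grammar start := by
  simp only [symsOf, List.mem_flatMap, List.mem_filter] at hb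
  obtain ⟨prod, hprod, hbp, -⟩ := hb
  simp only [PySem.Dict.getD] at hprod
  rcases hv : PySem.Dict.get? ⟨grammar⟩ sym with _ | v
  · rw [hv] at hprod; simp at hprod
  · rw [hv] at hprod
    simp only [PySem.Dict.get?, Option.map_eq_some_iff] at hv
    obtain ⟨kv, hfind, hsnd⟩ := hv
    have hmem := List.mem_of_find?_eq_some hfind
    simp only [UU, List.mem_cons, List.mem_flatMap]
    exact Or.inr ⟨kv, hmem, prod, by simpa [hsnd] using hprod, hbp⟩

-- symsOf with the UU-membership proofs attached (shared by both ports' termination)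
def childSyms (grammar : List (String × List (List String))) (start : String) (sym : String) :
    List {x : String // x ∈ UU grammar start} :=
  (symsOf grammar sym).attach.map (fun t => ⟨t.1, symsOf_mem_UU grammar start sym t.2⟩)

-- A's while-loop: pop the top of the stack; if unseen, mark it and push its uppercase
-- production symbols (head of the list = top of the Python stack)
def loopA (grammar : List (String × List (List String))) (start : String)
    (stack : List {x : String // x ∈ UU grammar start}) (r : PySem.Set String) :
    PySem.Set String :=
  match stack with
  | [] => r
  | sym :: rest =>
    if h : PySem.Set.contains r sym.1 then
      loopA grammar start rest r
    else
      loopA grammar start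
        ((childSyms grammar start sym.1).foldl (fun st t => t :: st) rest)
        (PySem.Set.add r sym.1)
termination_by (((UU grammar start).toFinset \ r.toFinset).card, stack.length)
decreasing_by
  · exact Prod.Lex.right _ (Nat.lt_succ_self _)
  · apply Prod.Lex.left
    apply Finset.card_lt_card
    have hnm : sym.1 ∉ r := by
      simpa [PySem.Set.contains] using h
    have hadd : PySem.Set.add r sym.1 = r ++ [sym.1] := by
      simp [PySem.Set.add, PySem.Set.contains] at h ⊢
      intro hc; exact absurd hc hnm
    constructor
    · intro x hx
      rw [hadd] at hx
      simp only [Finset.mem_sdiff, List.mem_toFinset, List.mem_append, List.mem_singleton] at hx ⊢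
      exact ⟨hx.1, fun hxr => hx.2 (Or.inl hxr)⟩
    · intro hsub
      have : sym.1 ∈ (UU grammar start).toFinset \ r.toFinset := by
        simp only [Finset.mem_sdiff, List.mem_toFinset]
        exact ⟨sym.2, hnm⟩
      have := hsub this
      rw [hadd] at this
      simp at this

def remove_unreachable (grammar : List (String × List (List String))) (start : String) :
    List (String × List (List String)) :=
  let reachable := loopA grammar start [⟨start, List.mem_cons_self⟩] PySem.Set.empty
  grammar.filter (fun kv => PySem.Set.contains reachable kv.1)

-- ===== PORT B =====

-- B's recursive DFS.  `visit(symbol)` becomes visiting a LIST of symbols in order with the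
-- reachable set threaded through; the subtype result (input ⊆ output) carries the measure.
def visitB (grammar : List (String × List (List String))) (start : String)
    (syms : List {x : String // x ∈ UU grammar start}) (r : PySem.Set String) :
    {r' : PySem.Set String // r ⊆ r'} :=
  match syms with
  | [] => ⟨r, fun _ h => h⟩
  | s :: ts =>
    if h : PySem.Set.contains r s.1 then
      visitB grammar start ts r
    else
      let inner := visitB grammar start (childSyms grammar start s.1) (PySem.Set.add r s.1)
      let res := visitB grammar start ts inner.1
      ⟨res.1, fun x hx => res.2 (inner.2 (by
        simp only [PySem.Set.add]
        split
        · exact hx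
        · exact List.mem_append_left _ hx))⟩
termination_by (((UU grammar start).toFinset \ r.toFinset).card, syms.length)
decreasing_by
  · exact Prod.Lex.right _ (Nat.lt_succ_self _)
  · apply Prod.Lex.left
    apply Finset.card_lt_card
    have hnm : s.1 ∉ r := by simpa [PySem.Set.contains] using h
    have hadd : PySem.Set.add r s.1 = r ++ [s.1] := by
      simp [PySem.Set.add, PySem.Set.contains] at h ⊢
      intro hc; exact absurd hc hnm
    constructor
    · intro x hx
      rw [hadd] at hx
      simp only [Finset.mem_sdiff, List.mem_toFinset, List.mem_append, List.mem_singleton] at hx ⊢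
      exact ⟨hx.1, fun hxr => hx.2 (Or.inl hxr)⟩
    · intro hsub
      have hs : s.1 ∈ (UU grammar start).toFinset \ r.toFinset := by
        simp only [Finset.mem_sdiff, List.mem_toFinset]
        exact ⟨s.2, hnm⟩
      have := hsub hs
      rw [hadd] at this
      simp at this
  · apply Prod.Lex.left
    apply Finset.card_lt_card
    have hnm : s.1 ∉ r := by simpa [PySem.Set.contains] using h
    have hsubr : r ⊆ inner.1 := fun x hx => inner.2 (by
      simp only [PySem.Set.add]
      split
      · exact hx
      · exact List.mem_append_left _ hx)
    have hsin : s.1 ∈ inner.1 := inner.2 (by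
      simp only [PySem.Set.add]
      split
      · rename_i hc
        exact absurd (by simpa [PySem.Set.contains] using hc) hnm
      · exact List.mem_append_right _ (List.mem_singleton.mpr rfl))
    constructor
    · intro x hx
      simp only [Finset.mem_sdiff, List.mem_toFinset] at hx ⊢
      exact ⟨hx.1, fun hxr => hx.2 (hsubr hxr)⟩
    · intro hsub
      have hs : s.1 ∈ (UU grammar start).toFinset \ r.toFinset := by
        simp only [Finset.mem_sdiff, List.mem_toFinset]
        exact ⟨s.2, hnm⟩
      have := hsub hs
      simp only [Finset.mem_sdiff, List.mem_toFinset] at this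
      exact this.2 hsin

def remove_unreachable_alt (grammar : List (String × List (List String))) (start : String) :
    List (String × List (List String)) :=
  let reachable := (visitB grammar start [⟨start, List.mem_cons_self⟩] PySem.Set.empty).1
  grammar.filter (fun kv => PySem.Set.contains reachable kv.1)

-- ===== PRECONDITION & SPEC =====
def Spec_remove_unreachable (grammar : List (String × List (List String))) (start : String) (out : List (String × List (List String))) : Prop := out = remove_unreachable_alt grammar start
instance (grammar : List (String × List (List String))) (start : String) (out : List (String × List (List String))) : Decidable (Spec_remove_unreachable grammar start out) := by unfold Spec_remove_unreachable; infer_instance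

-- ===== CLAIM (what is proved, stated in full; the proofs are below) =====
def Claim_equal_remove_unreachable : Prop := ∀ (grammar : List (String × List (List String))) (start : String), Dom_remove_unreachable grammar start → Spec_remove_unreachable grammar start (remove_unreachable grammar start)

-- ===== LEMMAS AND PROOFS =====

-- the graph-reachability relation both traversals compute: start, closed under uppercase
-- production symbols
inductive Reach (grammar : List (String × List (List String))) (start : String) : String → Prop
  | start : Reach grammar start start
  | step {a b : String} : Reach grammar start a → b ∈ symsOf grammar a → Reach grammar start b

theorem mem_add_iff {r : PySem.Set String} {x y : String} :
    y ∈ PySem.Set.add r x ↔ y ∈ r ∨ y = x :=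
  PySem.Set.mem_add r x y

theorem contains_iff {r : PySem.Set String} {x : String} :
    PySem.Set.contains r x = true ↔ x ∈ r := by
  simp [PySem.Set.contains]

theorem foldl_cons_eq {α : Type} (l : List α) (st : List α) :
    l.foldl (fun st t => t :: st) st = l.reverse ++ st := by
  induction l generalizing st with
  | nil => simp
  | cons a l ih => simp [List.foldl_cons, ih]

theorem mem_childSyms {grammar : List (String × List (List String))} {start sym b : String}
    (hb : b ∈ symsOf grammar sym) :
    ∃ t ∈ childSyms grammar start sym, t.1 = b := by
  refine ⟨⟨b, symsOf_mem_UU grammar start sym hb⟩, ?_, rfl⟩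
  simp only [childSyms, List.mem_map]
  exact ⟨⟨b, hb⟩, List.mem_attach _ _, rfl⟩

theorem childSyms_val {grammar : List (String × List (List String))} {start sym : String}
    {t : {x : String // x ∈ UU grammar start}} (ht : t ∈ childSyms grammar start sym) :
    t.1 ∈ symsOf grammar sym := by
  simp only [childSyms, List.mem_map] at ht
  obtain ⟨u, -, rfl⟩ := ht
  exact u.2

-- ---- A-side loop lemmas ----

theorem loopA_mono (grammar : List (String × List (List String))) (start : String)
    (stack : List {x : String // x ∈ UU grammar start}) (r : PySem.Set String) :
    r ⊆ loopA grammar start stack r := by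
  induction stack, r using loopA.induct grammar start with
  | case1 r => rw [loopA]; exact fun _ h => h
  | case2 r sym rest h ih => rw [loopA, dif_pos h]; exact ih
  | case3 r sym rest h ih =>
    rw [loopA, dif_neg h]
    intro x hx
    exact ih (mem_add_iff.mpr (Or.inl hx))

theorem loopA_mem_stack (grammar : List (String × List (List String))) (start : String)
    (stack : List {x : String // x ∈ UU grammar start}) (r : PySem.Set String) :
    ∀ s ∈ stack, s.1 ∈ loopA grammar start stack r := by
  induction stack, r using loopA.induct grammar start with
  | case1 r => rw [loopA]; intro s hs; exact absurd hs (List.not_mem_nil)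
  | case2 r sym rest h ih =>
    intro s hs
    rw [loopA, dif_pos h]
    rcases List.mem_cons.mp hs with rfl | hs'
    · exact loopA_mono grammar start rest r (contains_iff.mp h)
    · exact ih s hs'
  | case3 r sym rest h ih =>
    intro s hs
    rw [loopA, dif_neg h]
    rcases List.mem_cons.mp hs with rfl | hs'
    · exact loopA_mono grammar start _ _ (mem_add_iff.mpr (Or.inr rfl))
    · refine ih s ?_
      rw [foldl_cons_eq]
      exact List.mem_append_right _ hs'

theorem loopA_closed (grammar : List (String × List (List String))) (start : String)
    (stack : List {x : String // x ∈ UU grammar start}) (r : PySem.Set String) :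
    ∀ a ∈ loopA grammar start stack r,
      a ∈ r ∨ ∀ b ∈ symsOf grammar a, b ∈ loopA grammar start stack r := by
  induction stack, r using loopA.induct grammar start with
  | case1 r => rw [loopA]; intro a ha; exact Or.inl ha
  | case2 r sym rest h ih =>
    intro a ha
    rw [loopA, dif_pos h] at ha ⊢
    exact ih a ha
  | case3 r sym rest h ih =>
    intro a ha
    rw [loopA, dif_neg h] at ha ⊢
    rcases ih a ha with har | hcl
    · rcases mem_add_iff.mp har with har' | rfl
      · exact Or.inl har'
      · refine Or.inr ?_
        intro b hb
        obtain ⟨t, htm, rfl⟩ := mem_childSyms (start := start) hb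
        refine loopA_mem_stack grammar start _ _ t ?_
        rw [foldl_cons_eq]
        exact List.mem_append_left _ (by simpa using htm)
    · exact Or.inr hcl

theorem loopA_sound (grammar : List (String × List (List String))) (start : String)
    (stack : List {x : String // x ∈ UU grammar start}) (r : PySem.Set String)
    (hr : ∀ x ∈ r, Reach grammar start x) (hst : ∀ s ∈ stack, Reach grammar start s.1) :
    ∀ x ∈ loopA grammar start stack r, Reach grammar start x := by
  induction stack, r using loopA.induct grammar start with
  | case1 r => rw [loopA]; intro x hx; exact hr x hx
  | case2 r sym rest h ih =>
    rw [loopA, dif_pos h]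
    exact ih hr (fun s hs => hst s (List.mem_cons_of_mem _ hs))
  | case3 r sym rest h ih =>
    rw [loopA, dif_neg h]
    have hsym : Reach grammar start sym.1 := hst sym List.mem_cons_self
    refine ih ?_ ?_
    · intro x hx
      rcases mem_add_iff.mp hx with hx' | rfl
      · exact hr x hx'
      · exact hsym
    · intro s hs
      rw [foldl_cons_eq] at hs
      rcases List.mem_append.mp hs with hs' | hs'
      · exact Reach.step hsym (childSyms_val (by simpa using hs'))
      · exact hst s (List.mem_cons_of_mem _ hs')

-- ---- B-side recursion lemmas ----

theorem visitB_mem (grammar : List (String × List (List String))) (start : String)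
    (syms : List {x : String // x ∈ UU grammar start}) (r : PySem.Set String) :
    ∀ s ∈ syms, s.1 ∈ (visitB grammar start syms r).1 := by
  induction syms, r using visitB.induct grammar start with
  | case1 r => rw [visitB]; intro s hs; exact absurd hs (List.not_mem_nil)
  | case2 r s ts h ih =>
    intro u hu
    rw [visitB, dif_pos h]
    rcases List.mem_cons.mp hu with rfl | hu'
    · exact (visitB grammar start ts r).2 (contains_iff.mp h)
    · exact ih u hu'
  | case3 r s ts h inner ihc ih ih' =>
    intro u hu
    rw [visitB, dif_neg h]
    rcases List.mem_cons.mp hu with rfl | hu'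
    · exact (visitB grammar start ts _).2
        ((visitB grammar start (childSyms grammar start u.1) _).2
          (mem_add_iff.mpr (Or.inr rfl)))
    · exact ih u hu'

theorem visitB_closed (grammar : List (String × List (List String))) (start : String)
    (syms : List {x : String // x ∈ UU grammar start}) (r : PySem.Set String) :
    ∀ a ∈ (visitB grammar start syms r).1,
      a ∈ r ∨ ∀ b ∈ symsOf grammar a, b ∈ (visitB grammar start syms r).1 := by
  induction syms, r using visitB.induct grammar start with
  | case1 r => rw [visitB]; intro a ha; exact Or.inl ha
  | case2 r s ts h ih =>
    intro a ha
    rw [visitB, dif_pos h] at ha ⊢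
    exact ih a ha
  | case3 r s ts h inner ihc ih ih' =>
    intro a ha
    rw [visitB, dif_neg h] at ha ⊢
    rcases ih a ha with hain | hcl
    · -- a came out of the inner (children) call
      rcases ihc a hain with har1 | hcl'
      · rcases mem_add_iff.mp har1 with har | rfl
        · exact Or.inl har
        · refine Or.inr ?_
          intro b hb
          obtain ⟨t, htm, rfl⟩ := mem_childSyms (start := start) hb
          exact (visitB grammar start ts _).2 (visitB_mem grammar start _ _ t htm)
      · refine Or.inr ?_
        intro b hb
        exact (visitB grammar start ts _).2 (hcl' b hb)
    · exact Or.inr hcl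

theorem visitB_sound (grammar : List (String × List (List String))) (start : String)
    (syms : List {x : String // x ∈ UU grammar start}) (r : PySem.Set String)
    (hr : ∀ x ∈ r, Reach grammar start x) (hst : ∀ s ∈ syms, Reach grammar start s.1) :
    ∀ x ∈ (visitB grammar start syms r).1, Reach grammar start x := by
  induction syms, r using visitB.induct grammar start with
  | case1 r => rw [visitB]; intro x hx; exact hr x hx
  | case2 r s ts h ih =>
    rw [visitB, dif_pos h]
    exact ih hr (fun u hu => hst u (List.mem_cons_of_mem _ hu))
  | case3 r s ts h inner ihc ih ih' =>
    rw [visitB, dif_neg h]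
    have hsym : Reach grammar start s.1 := hst s List.mem_cons_self
    refine ih ?_ (fun u hu => hst u (List.mem_cons_of_mem _ hu))
    refine ihc ?_ ?_
    · intro x hx
      rcases mem_add_iff.mp hx with hx' | rfl
      · exact hr x hx'
      · exact hsym
    · intro t ht
      exact Reach.step hsym (childSyms_val ht)

-- ---- both reachable sets have the same members: Reach ----

theorem loopA_iff_reach (grammar : List (String × List (List String))) (start : String)
    (x : String) :
    x ∈ loopA grammar start [⟨start, List.mem_cons_self⟩] PySem.Set.empty ↔
      Reach grammar start x := by
  constructor
  · exact fun hx => loopA_sound grammar start _ _ (by intro y hy; exact absurd hy (List.not_mem_nil))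
      (by intro s hs; rcases List.mem_cons.mp hs with rfl | hs'
          · exact Reach.start
          · exact absurd hs' (List.not_mem_nil)) x hx
  · intro hx
    induction hx with
    | start => exact loopA_mem_stack grammar start _ _ _ List.mem_cons_self
    | step ha hb iha =>
      rcases loopA_closed grammar start _ _ _ iha with h0 | hcl
      · exact absurd h0 (List.not_mem_nil)
      · exact hcl _ hb

theorem visitB_iff_reach (grammar : List (String × List (List String))) (start : String)
    (x : String) :
    x ∈ (visitB grammar start [⟨start, List.mem_cons_self⟩] PySem.Set.empty).1 ↔
      Reach grammar start x := by
  constructor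
  · exact fun hx => visitB_sound grammar start _ _ (by intro y hy; exact absurd hy (List.not_mem_nil))
      (by intro s hs; rcases List.mem_cons.mp hs with rfl | hs'
          · exact Reach.start
          · exact absurd hs' (List.not_mem_nil)) x hx
  · intro hx
    induction hx with
    | start => exact visitB_mem grammar start _ _ _ List.mem_cons_self
    | step ha hb iha =>
      rcases visitB_closed grammar start _ _ _ iha with h0 | hcl
      · exact absurd h0 (List.not_mem_nil)
      · exact hcl _ hb

-- ===== VERDICT (by name: the statement is the Claim_ definition above) =====
theorem remove_unreachable_spec : Claim_equal_remove_unreachable := by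
  intro grammar start _
  unfold Spec_remove_unreachable remove_unreachable remove_unreachable_alt
  apply List.filter_congr
  intro kv _
  rw [Bool.eq_iff_iff, contains_iff, contains_iff, loopA_iff_reach, visitB_iff_reach]
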